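-- pv_equiv track=rewrite | github.com/markdrago/pgsanity | pgsanity/sqlprep.py | get_processing_state
-- ===== SOURCE A (Python) =====
-- def get_processing_state(current_state, current_token):
--     """determine the current state of processing an SQL-string.
--
--     current_state   --    see 'States' further down in this dcostring
--
--     current_token   --    any character or character-pair which can prompt one
--                           or more transitions in SQL-state (quote-marks,
--                           comment-starting symbols, etc.)
--                           NOTE: For both double-quote and single-quote
--                           characters, the passed-in token should consist of the
--                           initial quote character, plus the character which
--                           immediately follows it, because it is not possible
--                           to determine the next state without it.
--
--     return: state symbol.
--
--     States:
--
--         _    --    the base state wherein SQL tokens, commands, and math and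
--                    other operators occur. This is the initial processesing state
--                    in which the machine starts off
--
--         /*   --    block-comment state. In block-comments, no SQL actually
--                    occurs, meaning special characters like quotes and semicolons
--                    have no effect
--
--         $$   --    extended-string state. In extended strings, all characters
--                    are interpreted as string-data, meaning SQL-commands,
--                    operators, etc. have no effect
--
--         --   --    line-comment state. All characters are ignored and not
--                    treated as SQL except for '\n', which is the only character
--                    that prompts a transition out of this state
--
--         ;    --    the final state which indicates a single, complete
--                    SQL-statement has just been completed
--
--         '    --    single-quote state. In this state, no characters are treated
--                    as SQL. The only transition away is "'" followed by any
--                    character other than "'"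
--
--         '2   --    single-quote pre-exit state. Identical to the single-quote
--                    state except that encountering a character other than "'"
--                    causes the current single-quoted string to be closed
--
--         "    --    double-quote state. Similar in nature to the single-quote
--                    state, except that possible transition away is intiated
--                    by '"' instead of "'".
--
--         "2   --    double-quote pre-exit state. Similar in nature to the single-
--                    quote pre-exit state except that '"' prompts a return back to
--                    the stable double-quote state, rather than "'"
--     """
--     transitions = {
--         '_': {
--             0: '_', '/*' : '/*', '--': '--', '$$': '$$',
--             "'": "'", '"': '"', ';': ';', "''": "'2", '""': '"2'
--         },
--         "'": {0: "'", "'": "'2"},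
--         "'2":  {0: "_", "'": "'", ';': ';'},
--         '"': {0: '"', '"': '"2'},
--         '"2':  {0: '_', '"': '"', ';': ';'},
--         '--':  {0: '--', '\n':'_'},
--         '/*': {0: '/*', '*/':'_'},
--         '$$':  {0: '$$', '$$': '_'},
--     }
--     # ^ Above, transitions[current_state][0] represents the transition to take
--     # if no transition is explicitly defined for the passed-in character
--     if current_state not in transitions:
--         raise ValueError("Received an invalid state '{}'".format(current_state))
--     if current_token in transitions[current_state]:
--         return transitions[current_state][current_token]
--     elif current_token[0] in transitions[current_state]:
--     # if we have a double-quote + peek character or a single-quote + char,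
--     # transition using that
--         temp_state = transitions[current_state][current_token[0]]
--         return get_processing_state(temp_state,current_token[1]) # recurse
--     else:
--         return transitions[current_state][0]
-- ===== SOURCE B (Python) =====
-- # B: same transition relation, but decomposed into a per-state default table and an
-- # explicit-key table, and the one-level recursion unrolled into a straight-line
-- # second table step (the recursion depth is bounded by 1, since the recursed token
-- # is a single character and can only hit the first or the default branch).
--
-- _DEFAULT = {
--     '_': '_', "'": "'", "'2": '_', '"': '"', '"2': '_',
--     '--': '--', '/*': '/*', '$$': '$$',
-- }
--
-- _EXPLICIT = {
--     '_': {'/*': '/*', '--': '--', '$$': '$$', "'": "'", '"': '"',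
--           ';': ';', "''": "'2", '""': '"2'},
--     "'": {"'": "'2"},
--     "'2": {"'": "'", ';': ';'},
--     '"': {'"': '"2'},
--     '"2': {'"': '"', ';': ';'},
--     '--': {'\n': '_'},
--     '/*': {'*/': '_'},
--     '$$': {'$$': '_'},
-- }
--
--
-- def get_processing_state(current_state, current_token):
--     if current_state not in _DEFAULT:
--         raise ValueError("Received an invalid state '{}'".format(current_state))
--     explicit = _EXPLICIT[current_state]
--     if current_token in explicit:
--         return explicit[current_token]
--     head = current_token[0]
--     if head not in explicit:
--         return _DEFAULT[current_state]
--     # quote + peek character: take the head transition, then resolve the peek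
--     # character with one more table step (it is a single character, so it either
--     # matches an explicit key or falls to the default)
--     state2 = explicit[head]
--     peek = current_token[1]
--     return _EXPLICIT[state2].get(peek, _DEFAULT[state2])
-- ===== Notes on version B (the rewrite author's own statement) =====
-- stated objective: simpler
-- what changed: A resolves the quote+peek token by re-entering itself recursively through one mixed-key (0/str) transition dict; B splits the table into a per-state default map and an explicit-key map and unrolls the bounded one-level recursion into a straight-line second table step.
import Mathlib
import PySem

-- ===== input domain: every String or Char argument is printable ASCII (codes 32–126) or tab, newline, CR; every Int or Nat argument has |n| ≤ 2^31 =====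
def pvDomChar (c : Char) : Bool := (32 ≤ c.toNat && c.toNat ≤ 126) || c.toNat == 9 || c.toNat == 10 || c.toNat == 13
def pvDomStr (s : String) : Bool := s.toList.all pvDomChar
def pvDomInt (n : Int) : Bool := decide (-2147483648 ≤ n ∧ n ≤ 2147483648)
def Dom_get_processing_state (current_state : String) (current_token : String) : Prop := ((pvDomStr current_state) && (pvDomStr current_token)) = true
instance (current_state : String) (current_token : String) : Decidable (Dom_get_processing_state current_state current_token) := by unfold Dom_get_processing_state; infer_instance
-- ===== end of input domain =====

-- B replaces A's recursive lookup by a default/explicit table split with the one-level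
-- recursion unrolled into a straight-line second table step (objective: simpler; return
-- values only — where A raises, Pre_ excludes the input and the ports return "").

-- ===== PORT A =====
-- Python's per-state dicts mix the int key 0 (the default transition) with string keys;
-- modelled as PySem.Dict (Option String) String with `none` standing for the key 0.
def pvTransA : PySem.Dict String (PySem.Dict (Option String) String) :=
  PySem.Dict.ofList [
    ("_", PySem.Dict.ofList [(none, "_"), (some "/*", "/*"), (some "--", "--"), (some "$$", "$$"),
        (some "'", "'"), (some "\"", "\""), (some ";", ";"), (some "''", "'2"), (some "\"\"", "\"2")]),
    ("'", PySem.Dict.ofList [(none, "'"), (some "'", "'2")]),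
    ("'2", PySem.Dict.ofList [(none, "_"), (some "'", "'"), (some ";", ";")]),
    ("\"", PySem.Dict.ofList [(none, "\""), (some "\"", "\"2")]),
    ("\"2", PySem.Dict.ofList [(none, "_"), (some "\"", "\""), (some ";", ";")]),
    ("--", PySem.Dict.ofList [(none, "--"), (some "\n", "_")]),
    ("/*", PySem.Dict.ofList [(none, "/*"), (some "*/", "_")]),
    ("$$", PySem.Dict.ofList [(none, "$$"), (some "$$", "_")])]

def get_processing_state (current_state : String) (current_token : String) : String :=
  match pvTransA.get? current_state with
  | none => ""          -- Python: raise ValueError (excluded by Pre_)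
  | some row =>
    match row.get? (some current_token) with
    | some v => v       -- return transitions[current_state][current_token]
    | none =>
      match PySem.Str.pyGet? current_token 0 with
      | none => ""      -- Python: IndexError on current_token[0] (excluded by Pre_)
      | some c0 =>
        match row.get? (some (String.ofList [c0])) with
        | some temp_state =>
          match h1 : PySem.Str.pyGet? current_token 1 with
          | none => ""  -- Python: IndexError on current_token[1] (excluded by Pre_)
          | some c1 => get_processing_state temp_state (String.ofList [c1])  -- recurse
        | none =>
          (row.get? none).getD ""   -- transitions[current_state][0] (key 0 is always present)
  termination_by current_token.toList.length
  decreasing_by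
    simp only [PySem.Str.pyGet?_eq, PySem.Chars.pyGet?_eq_listPyGet?] at h1
    simp only [String.toList_ofList, List.length_cons, List.length_nil]
    cases hl : current_token.toList with
    | nil => rw [hl] at h1; simp [PySem.List.pyGet?] at h1
    | cons a l =>
      cases l with
      | nil => rw [hl] at h1; simp [PySem.List.pyGet?, PySem.List.pyIdx?] at h1
      | cons b l2 => simp

-- ===== PORT B =====
def pvDefaultB : PySem.Dict String String :=
  PySem.Dict.ofList [("_", "_"), ("'", "'"), ("'2", "_"), ("\"", "\""), ("\"2", "_"),
    ("--", "--"), ("/*", "/*"), ("$$", "$$")]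

def pvExplicitB : PySem.Dict String (PySem.Dict String String) :=
  PySem.Dict.ofList [
    ("_", PySem.Dict.ofList [("/*", "/*"), ("--", "--"), ("$$", "$$"), ("'", "'"),
        ("\"", "\""), (";", ";"), ("''", "'2"), ("\"\"", "\"2")]),
    ("'", PySem.Dict.ofList [("'", "'2")]),
    ("'2", PySem.Dict.ofList [("'", "'"), (";", ";")]),
    ("\"", PySem.Dict.ofList [("\"", "\"2")]),
    ("\"2", PySem.Dict.ofList [("\"", "\""), (";", ";")]),
    ("--", PySem.Dict.ofList [("\n", "_")]),
    ("/*", PySem.Dict.ofList [("*/", "_")]),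
    ("$$", PySem.Dict.ofList [("$$", "_")])]

def get_processing_state_alt (current_state : String) (current_token : String) : String :=
  if pvDefaultB.contains current_state = false then ""   -- Python: raise ValueError (excluded by Pre_)
  else
    match pvExplicitB.get? current_state with
    | none => ""    -- unreachable: _EXPLICIT has every key _DEFAULT has
    | some explicit =>
      match explicit.get? current_token with
      | some v => v
      | none =>
        match PySem.Str.pyGet? current_token 0 with
        | none => ""    -- Python: IndexError on current_token[0] (excluded by Pre_)
        | some h =>
          match explicit.get? (String.ofList [h]) with
          | none => pvDefaultB.getD current_state ""
          | some state2 =>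
            -- Python evaluates _EXPLICIT[state2] and _DEFAULT[state2] (KeyError when
            -- state2 = ";", excluded by Pre_) and current_token[1] (IndexError, excluded)
            match pvExplicitB.get? state2, pvDefaultB.get? state2 with
            | some e2, some d2 =>
              match PySem.Str.pyGet? current_token 1 with
              | none => ""
              | some p => e2.getD (String.ofList [p]) d2
            | _, _ => ""

-- ===== PRECONDITION & SPEC =====
-- Pre_ admits exactly the inputs where the Python A returns: the state must be one of the
-- eight table states (else ValueError), the token non-empty (else IndexError), and a
-- multi-character token may not start with ';' in a state where ';' is a transition key
-- (A then recurses into the final state ";", which is not in the table, and raises ValueError).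
def Pre_get_processing_state (current_state : String) (current_token : String) : Prop :=
  current_state ∈ ["_", "'", "'2", "\"", "\"2", "--", "/*", "$$"] ∧
  current_token.toList ≠ [] ∧
  ¬ (2 ≤ current_token.toList.length ∧ current_token.toList.head? = some ';' ∧
      (current_state = "_" ∨ current_state = "'2" ∨ current_state = "\"2"))
instance (current_state : String) (current_token : String) : Decidable (Pre_get_processing_state current_state current_token) := by unfold Pre_get_processing_state; infer_instance

def pvWitness_get_processing_state : String × String := ("_", "''")

def Spec_get_processing_state (current_state : String) (current_token : String) (out : String) : Prop := out = get_processing_state_alt current_state current_token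
instance (current_state : String) (current_token : String) (out : String) : Decidable (Spec_get_processing_state current_state current_token out) := by unfold Spec_get_processing_state; infer_instance

-- ===== CLAIM (what is proved, stated in full; the proofs are below) =====
def Claim_equal_get_processing_state : Prop := ∀ (current_state : String) (current_token : String), Dom_get_processing_state current_state current_token → Pre_get_processing_state current_state current_token → Spec_get_processing_state current_state current_token (get_processing_state current_state current_token)

-- ===== LEMMAS AND PROOFS =====
lemma get?_mk_nil {κ ν : Type} [BEq κ] (k : κ) : (PySem.Dict.mk ([] : List (κ × ν))).get? k = none := by
  simp [PySem.Dict.get?]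

lemma lit_cond (s : String) (c : Char) : (s = String.ofList [c]) = (s.toList = [c]) := by
  rw [String.ext_iff]; simp

lemma pyget0 (t : String) (c : Char) (l : List Char) (ht : t.toList = c :: l) :
    PySem.Str.pyGet? t 0 = some c := by
  simp [PySem.Str.pyGet?_eq, PySem.Chars.pyGet?_eq_listPyGet?, ht, PySem.List.pyGet?_zero]

lemma pyget1 (t : String) (c : Char) (l : List Char) (ht : t.toList = c :: l) :
    PySem.Str.pyGet? t 1 = l.head? := by
  simp only [PySem.Str.pyGet?_eq, PySem.Chars.pyGet?_eq_listPyGet?, ht]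
  cases l <;> simp [PySem.List.pyGet?, PySem.List.pyIdx?]

def rowA_us : PySem.Dict (Option String) String := PySem.Dict.mk [(none, "_"), (some "/*", "/*"), (some "--", "--"), (some "$$", "$$"), (some "'", "'"), (some "\"", "\""), (some ";", ";"), (some "''", "'2"), (some "\"\"", "\"2")]
lemma rowA_us_get? (k : Option String) : rowA_us.get? k = (if none = k then some "_" else if some "/*" = k then some "/*" else if some "--" = k then some "--" else if some "$$" = k then some "$$" else if some "'" = k then some "'" else if some "\"" = k then some "\"" else if some ";" = k then some ";" else if some "''" = k then some "'2" else if some "\"\"" = k then some "\"2" else none) := by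
  simp only [rowA_us, PySem.Dict.get?_mk_cons, get?_mk_nil, beq_iff_eq]
lemma tblA_us : pvTransA.get? "_" = some rowA_us := by decide
def rowB_us : PySem.Dict String String := PySem.Dict.mk [("/*", "/*"), ("--", "--"), ("$$", "$$"), ("'", "'"), ("\"", "\""), (";", ";"), ("''", "'2"), ("\"\"", "\"2")]
lemma rowB_us_get? (k : String) : rowB_us.get? k = (if "/*" = k then some "/*" else if "--" = k then some "--" else if "$$" = k then some "$$" else if "'" = k then some "'" else if "\"" = k then some "\"" else if ";" = k then some ";" else if "''" = k then some "'2" else if "\"\"" = k then some "\"2" else none) := by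
  simp only [rowB_us, PySem.Dict.get?_mk_cons, get?_mk_nil, beq_iff_eq]
lemma contB_us : pvDefaultB.contains "_" = true := by decide
lemma explB_us : pvExplicitB.get? "_" = some rowB_us := by decide
lemma defB_us : pvDefaultB.get? "_" = some "_" := by decide
lemma defD_us : pvDefaultB.getD "_" "" = "_" := by decide

def rowA_q : PySem.Dict (Option String) String := PySem.Dict.mk [(none, "'"), (some "'", "'2")]
lemma rowA_q_get? (k : Option String) : rowA_q.get? k = (if none = k then some "'" else if some "'" = k then some "'2" else none) := by
  simp only [rowA_q, PySem.Dict.get?_mk_cons, get?_mk_nil, beq_iff_eq]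
lemma tblA_q : pvTransA.get? "'" = some rowA_q := by decide
def rowB_q : PySem.Dict String String := PySem.Dict.mk [("'", "'2")]
lemma rowB_q_get? (k : String) : rowB_q.get? k = (if "'" = k then some "'2" else none) := by
  simp only [rowB_q, PySem.Dict.get?_mk_cons, get?_mk_nil, beq_iff_eq]
lemma contB_q : pvDefaultB.contains "'" = true := by decide
lemma explB_q : pvExplicitB.get? "'" = some rowB_q := by decide
lemma defB_q : pvDefaultB.get? "'" = some "'" := by decide
lemma defD_q : pvDefaultB.getD "'" "" = "'" := by decide

def rowA_q2 : PySem.Dict (Option String) String := PySem.Dict.mk [(none, "_"), (some "'", "'"), (some ";", ";")]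
lemma rowA_q2_get? (k : Option String) : rowA_q2.get? k = (if none = k then some "_" else if some "'" = k then some "'" else if some ";" = k then some ";" else none) := by
  simp only [rowA_q2, PySem.Dict.get?_mk_cons, get?_mk_nil, beq_iff_eq]
lemma tblA_q2 : pvTransA.get? "'2" = some rowA_q2 := by decide
def rowB_q2 : PySem.Dict String String := PySem.Dict.mk [("'", "'"), (";", ";")]
lemma rowB_q2_get? (k : String) : rowB_q2.get? k = (if "'" = k then some "'" else if ";" = k then some ";" else none) := by
  simp only [rowB_q2, PySem.Dict.get?_mk_cons, get?_mk_nil, beq_iff_eq]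
lemma contB_q2 : pvDefaultB.contains "'2" = true := by decide
lemma explB_q2 : pvExplicitB.get? "'2" = some rowB_q2 := by decide
lemma defB_q2 : pvDefaultB.get? "'2" = some "_" := by decide
lemma defD_q2 : pvDefaultB.getD "'2" "" = "_" := by decide

def rowA_dq : PySem.Dict (Option String) String := PySem.Dict.mk [(none, "\""), (some "\"", "\"2")]
lemma rowA_dq_get? (k : Option String) : rowA_dq.get? k = (if none = k then some "\"" else if some "\"" = k then some "\"2" else none) := by
  simp only [rowA_dq, PySem.Dict.get?_mk_cons, get?_mk_nil, beq_iff_eq]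
lemma tblA_dq : pvTransA.get? "\"" = some rowA_dq := by decide
def rowB_dq : PySem.Dict String String := PySem.Dict.mk [("\"", "\"2")]
lemma rowB_dq_get? (k : String) : rowB_dq.get? k = (if "\"" = k then some "\"2" else none) := by
  simp only [rowB_dq, PySem.Dict.get?_mk_cons, get?_mk_nil, beq_iff_eq]
lemma contB_dq : pvDefaultB.contains "\"" = true := by decide
lemma explB_dq : pvExplicitB.get? "\"" = some rowB_dq := by decide
lemma defB_dq : pvDefaultB.get? "\"" = some "\"" := by decide
lemma defD_dq : pvDefaultB.getD "\"" "" = "\"" := by decide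

def rowA_dq2 : PySem.Dict (Option String) String := PySem.Dict.mk [(none, "_"), (some "\"", "\""), (some ";", ";")]
lemma rowA_dq2_get? (k : Option String) : rowA_dq2.get? k = (if none = k then some "_" else if some "\"" = k then some "\"" else if some ";" = k then some ";" else none) := by
  simp only [rowA_dq2, PySem.Dict.get?_mk_cons, get?_mk_nil, beq_iff_eq]
lemma tblA_dq2 : pvTransA.get? "\"2" = some rowA_dq2 := by decide
def rowB_dq2 : PySem.Dict String String := PySem.Dict.mk [("\"", "\""), (";", ";")]
lemma rowB_dq2_get? (k : String) : rowB_dq2.get? k = (if "\"" = k then some "\"" else if ";" = k then some ";" else none) := by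
  simp only [rowB_dq2, PySem.Dict.get?_mk_cons, get?_mk_nil, beq_iff_eq]
lemma contB_dq2 : pvDefaultB.contains "\"2" = true := by decide
lemma explB_dq2 : pvExplicitB.get? "\"2" = some rowB_dq2 := by decide
lemma defB_dq2 : pvDefaultB.get? "\"2" = some "_" := by decide
lemma defD_dq2 : pvDefaultB.getD "\"2" "" = "_" := by decide

def rowA_dash : PySem.Dict (Option String) String := PySem.Dict.mk [(none, "--"), (some "\n", "_")]
lemma rowA_dash_get? (k : Option String) : rowA_dash.get? k = (if none = k then some "--" else if some "\n" = k then some "_" else none) := by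
  simp only [rowA_dash, PySem.Dict.get?_mk_cons, get?_mk_nil, beq_iff_eq]
lemma tblA_dash : pvTransA.get? "--" = some rowA_dash := by decide
def rowB_dash : PySem.Dict String String := PySem.Dict.mk [("\n", "_")]
lemma rowB_dash_get? (k : String) : rowB_dash.get? k = (if "\n" = k then some "_" else none) := by
  simp only [rowB_dash, PySem.Dict.get?_mk_cons, get?_mk_nil, beq_iff_eq]
lemma contB_dash : pvDefaultB.contains "--" = true := by decide
lemma explB_dash : pvExplicitB.get? "--" = some rowB_dash := by decide
lemma defB_dash : pvDefaultB.get? "--" = some "--" := by decide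
lemma defD_dash : pvDefaultB.getD "--" "" = "--" := by decide

def rowA_blk : PySem.Dict (Option String) String := PySem.Dict.mk [(none, "/*"), (some "*/", "_")]
lemma rowA_blk_get? (k : Option String) : rowA_blk.get? k = (if none = k then some "/*" else if some "*/" = k then some "_" else none) := by
  simp only [rowA_blk, PySem.Dict.get?_mk_cons, get?_mk_nil, beq_iff_eq]
lemma tblA_blk : pvTransA.get? "/*" = some rowA_blk := by decide
def rowB_blk : PySem.Dict String String := PySem.Dict.mk [("*/", "_")]
lemma rowB_blk_get? (k : String) : rowB_blk.get? k = (if "*/" = k then some "_" else none) := by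
  simp only [rowB_blk, PySem.Dict.get?_mk_cons, get?_mk_nil, beq_iff_eq]
lemma contB_blk : pvDefaultB.contains "/*" = true := by decide
lemma explB_blk : pvExplicitB.get? "/*" = some rowB_blk := by decide
lemma defB_blk : pvDefaultB.get? "/*" = some "/*" := by decide
lemma defD_blk : pvDefaultB.getD "/*" "" = "/*" := by decide

def rowA_dd : PySem.Dict (Option String) String := PySem.Dict.mk [(none, "$$"), (some "$$", "_")]
lemma rowA_dd_get? (k : Option String) : rowA_dd.get? k = (if none = k then some "$$" else if some "$$" = k then some "_" else none) := by
  simp only [rowA_dd, PySem.Dict.get?_mk_cons, get?_mk_nil, beq_iff_eq]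
lemma tblA_dd : pvTransA.get? "$$" = some rowA_dd := by decide
def rowB_dd : PySem.Dict String String := PySem.Dict.mk [("$$", "_")]
lemma rowB_dd_get? (k : String) : rowB_dd.get? k = (if "$$" = k then some "_" else none) := by
  simp only [rowB_dd, PySem.Dict.get?_mk_cons, get?_mk_nil, beq_iff_eq]
lemma contB_dd : pvDefaultB.contains "$$" = true := by decide
lemma explB_dd : pvExplicitB.get? "$$" = some rowB_dd := by decide
lemma defB_dd : pvDefaultB.get? "$$" = some "$$" := by decide
lemma defD_dd : pvDefaultB.getD "$$" "" = "$$" := by decide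

lemma tblA_semi : pvTransA.get? ";" = none := by decide
lemma explB_semi : pvExplicitB.get? ";" = none := by decide
lemma defB_semi : pvDefaultB.get? ";" = none := by decide

lemma scA_semi (u : String) : get_processing_state ";" u = "" := by
  rw [get_processing_state, tblA_semi]

lemma scA_us (c : Char) : get_processing_state "_" (String.ofList [c]) = (if '\'' = c then "'" else if '"' = c then "\"" else if ';' = c then ";" else "_") := by
  rw [get_processing_state, tblA_us]
  rw [pyget0 (String.ofList [c]) c [] (by simp)]
  simp only [rowA_us_get?, Option.some.injEq, lit_cond, String.reduceToList, String.toList_ofList, List.cons.injEq, and_true, and_false, reduceCtorEq, if_false, eq_self_iff_true, if_true, Option.getD_some, Option.getD_none]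
  split_ifs <;> rfl

lemma scA_q (c : Char) : get_processing_state "'" (String.ofList [c]) = (if '\'' = c then "'2" else "'") := by
  rw [get_processing_state, tblA_q]
  rw [pyget0 (String.ofList [c]) c [] (by simp)]
  simp only [rowA_q_get?, Option.some.injEq, lit_cond, String.reduceToList, String.toList_ofList, List.cons.injEq, and_true, and_false, reduceCtorEq, if_false, eq_self_iff_true, if_true, Option.getD_some, Option.getD_none]
  split_ifs <;> rfl

lemma scA_q2 (c : Char) : get_processing_state "'2" (String.ofList [c]) = (if '\'' = c then "'" else if ';' = c then ";" else "_") := by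
  rw [get_processing_state, tblA_q2]
  rw [pyget0 (String.ofList [c]) c [] (by simp)]
  simp only [rowA_q2_get?, Option.some.injEq, lit_cond, String.reduceToList, String.toList_ofList, List.cons.injEq, and_true, and_false, reduceCtorEq, if_false, eq_self_iff_true, if_true, Option.getD_some, Option.getD_none]
  split_ifs <;> rfl

lemma scA_dq (c : Char) : get_processing_state "\"" (String.ofList [c]) = (if '"' = c then "\"2" else "\"") := by
  rw [get_processing_state, tblA_dq]
  rw [pyget0 (String.ofList [c]) c [] (by simp)]
  simp only [rowA_dq_get?, Option.some.injEq, lit_cond, String.reduceToList, String.toList_ofList, List.cons.injEq, and_true, and_false, reduceCtorEq, if_false, eq_self_iff_true, if_true, Option.getD_some, Option.getD_none]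
  split_ifs <;> rfl

lemma scA_dq2 (c : Char) : get_processing_state "\"2" (String.ofList [c]) = (if '"' = c then "\"" else if ';' = c then ";" else "_") := by
  rw [get_processing_state, tblA_dq2]
  rw [pyget0 (String.ofList [c]) c [] (by simp)]
  simp only [rowA_dq2_get?, Option.some.injEq, lit_cond, String.reduceToList, String.toList_ofList, List.cons.injEq, and_true, and_false, reduceCtorEq, if_false, eq_self_iff_true, if_true, Option.getD_some, Option.getD_none]
  split_ifs <;> rfl

lemma main_us (t : String) (c : Char) (l : List Char) (ht : t.toList = c :: l) :
    get_processing_state "_" t = get_processing_state_alt "_" t := by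
  rw [get_processing_state, get_processing_state_alt, tblA_us]
  rw [pyget0 t c l ht]
  simp only [pyget1 t c l ht, contB_us, explB_us, Bool.true_eq_false,
    rowA_us_get?, rowB_us_get?, Option.some.injEq, lit_cond, String.reduceToList, String.toList_ofList, List.cons.injEq, and_true, and_false, reduceCtorEq, if_false, eq_self_iff_true, if_true, Option.getD_some, Option.getD_none]
  split_ifs <;> simp only [] <;>
    first
      | rfl
      | (simp only [Option.getD_some, defD_us]; rfl)
      | (split <;> rename_i heq <;> rw [pyget1 t c l ht] at heq <;>
           simp only [heq, scA_us, scA_q, scA_q2, scA_dq, scA_dq2, scA_semi,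
             explB_us, explB_q, explB_q2, explB_dq, explB_dq2, explB_dash, explB_blk, explB_dd, explB_semi,
             defB_us, defB_q, defB_q2, defB_dq, defB_dq2, defB_dash, defB_blk, defB_dd, defB_semi,
             PySem.Dict.getD_eq_get?_getD, rowB_us_get?, rowB_q_get?, rowB_q2_get?, rowB_dq_get?, rowB_dq2_get?, rowB_dash_get?, rowB_blk_get?, rowB_dd_get?,
             Option.some.injEq, lit_cond, String.reduceToList, String.toList_ofList, List.cons.injEq, and_true, and_false, reduceCtorEq, if_false, eq_self_iff_true, if_true, Option.getD_some, Option.getD_none] <;>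
           first | rfl | (split_ifs <;> rfl))

lemma main_q (t : String) (c : Char) (l : List Char) (ht : t.toList = c :: l) :
    get_processing_state "'" t = get_processing_state_alt "'" t := by
  rw [get_processing_state, get_processing_state_alt, tblA_q]
  rw [pyget0 t c l ht]
  simp only [pyget1 t c l ht, contB_q, explB_q, Bool.true_eq_false,
    rowA_q_get?, rowB_q_get?, Option.some.injEq, lit_cond, String.reduceToList, String.toList_ofList, List.cons.injEq, and_true, and_false, reduceCtorEq, if_false, eq_self_iff_true, if_true, Option.getD_some, Option.getD_none]
  split_ifs <;> simp only [] <;>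
    first
      | rfl
      | (simp only [Option.getD_some, defD_q]; rfl)
      | (split <;> rename_i heq <;> rw [pyget1 t c l ht] at heq <;>
           simp only [heq, scA_us, scA_q, scA_q2, scA_dq, scA_dq2, scA_semi,
             explB_us, explB_q, explB_q2, explB_dq, explB_dq2, explB_dash, explB_blk, explB_dd, explB_semi,
             defB_us, defB_q, defB_q2, defB_dq, defB_dq2, defB_dash, defB_blk, defB_dd, defB_semi,
             PySem.Dict.getD_eq_get?_getD, rowB_us_get?, rowB_q_get?, rowB_q2_get?, rowB_dq_get?, rowB_dq2_get?, rowB_dash_get?, rowB_blk_get?, rowB_dd_get?,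
             Option.some.injEq, lit_cond, String.reduceToList, String.toList_ofList, List.cons.injEq, and_true, and_false, reduceCtorEq, if_false, eq_self_iff_true, if_true, Option.getD_some, Option.getD_none] <;>
           first | rfl | (split_ifs <;> rfl))

lemma main_q2 (t : String) (c : Char) (l : List Char) (ht : t.toList = c :: l) :
    get_processing_state "'2" t = get_processing_state_alt "'2" t := by
  rw [get_processing_state, get_processing_state_alt, tblA_q2]
  rw [pyget0 t c l ht]
  simp only [pyget1 t c l ht, contB_q2, explB_q2, Bool.true_eq_false,
    rowA_q2_get?, rowB_q2_get?, Option.some.injEq, lit_cond, String.reduceToList, String.toList_ofList, List.cons.injEq, and_true, and_false, reduceCtorEq, if_false, eq_self_iff_true, if_true, Option.getD_some, Option.getD_none]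
  split_ifs <;> simp only [] <;>
    first
      | rfl
      | (simp only [Option.getD_some, defD_q2]; rfl)
      | (split <;> rename_i heq <;> rw [pyget1 t c l ht] at heq <;>
           simp only [heq, scA_us, scA_q, scA_q2, scA_dq, scA_dq2, scA_semi,
             explB_us, explB_q, explB_q2, explB_dq, explB_dq2, explB_dash, explB_blk, explB_dd, explB_semi,
             defB_us, defB_q, defB_q2, defB_dq, defB_dq2, defB_dash, defB_blk, defB_dd, defB_semi,
             PySem.Dict.getD_eq_get?_getD, rowB_us_get?, rowB_q_get?, rowB_q2_get?, rowB_dq_get?, rowB_dq2_get?, rowB_dash_get?, rowB_blk_get?, rowB_dd_get?,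
             Option.some.injEq, lit_cond, String.reduceToList, String.toList_ofList, List.cons.injEq, and_true, and_false, reduceCtorEq, if_false, eq_self_iff_true, if_true, Option.getD_some, Option.getD_none] <;>
           first | rfl | (split_ifs <;> rfl))

lemma main_dq (t : String) (c : Char) (l : List Char) (ht : t.toList = c :: l) :
    get_processing_state "\"" t = get_processing_state_alt "\"" t := by
  rw [get_processing_state, get_processing_state_alt, tblA_dq]
  rw [pyget0 t c l ht]
  simp only [pyget1 t c l ht, contB_dq, explB_dq, Bool.true_eq_false,
    rowA_dq_get?, rowB_dq_get?, Option.some.injEq, lit_cond, String.reduceToList, String.toList_ofList, List.cons.injEq, and_true, and_false, reduceCtorEq, if_false, eq_self_iff_true, if_true, Option.getD_some, Option.getD_none]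
  split_ifs <;> simp only [] <;>
    first
      | rfl
      | (simp only [Option.getD_some, defD_dq]; rfl)
      | (split <;> rename_i heq <;> rw [pyget1 t c l ht] at heq <;>
           simp only [heq, scA_us, scA_q, scA_q2, scA_dq, scA_dq2, scA_semi,
             explB_us, explB_q, explB_q2, explB_dq, explB_dq2, explB_dash, explB_blk, explB_dd, explB_semi,
             defB_us, defB_q, defB_q2, defB_dq, defB_dq2, defB_dash, defB_blk, defB_dd, defB_semi,
             PySem.Dict.getD_eq_get?_getD, rowB_us_get?, rowB_q_get?, rowB_q2_get?, rowB_dq_get?, rowB_dq2_get?, rowB_dash_get?, rowB_blk_get?, rowB_dd_get?,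
             Option.some.injEq, lit_cond, String.reduceToList, String.toList_ofList, List.cons.injEq, and_true, and_false, reduceCtorEq, if_false, eq_self_iff_true, if_true, Option.getD_some, Option.getD_none] <;>
           first | rfl | (split_ifs <;> rfl))

lemma main_dq2 (t : String) (c : Char) (l : List Char) (ht : t.toList = c :: l) :
    get_processing_state "\"2" t = get_processing_state_alt "\"2" t := by
  rw [get_processing_state, get_processing_state_alt, tblA_dq2]
  rw [pyget0 t c l ht]
  simp only [pyget1 t c l ht, contB_dq2, explB_dq2, Bool.true_eq_false,
    rowA_dq2_get?, rowB_dq2_get?, Option.some.injEq, lit_cond, String.reduceToList, String.toList_ofList, List.cons.injEq, and_true, and_false, reduceCtorEq, if_false, eq_self_iff_true, if_true, Option.getD_some, Option.getD_none]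
  split_ifs <;> simp only [] <;>
    first
      | rfl
      | (simp only [Option.getD_some, defD_dq2]; rfl)
      | (split <;> rename_i heq <;> rw [pyget1 t c l ht] at heq <;>
           simp only [heq, scA_us, scA_q, scA_q2, scA_dq, scA_dq2, scA_semi,
             explB_us, explB_q, explB_q2, explB_dq, explB_dq2, explB_dash, explB_blk, explB_dd, explB_semi,
             defB_us, defB_q, defB_q2, defB_dq, defB_dq2, defB_dash, defB_blk, defB_dd, defB_semi,
             PySem.Dict.getD_eq_get?_getD, rowB_us_get?, rowB_q_get?, rowB_q2_get?, rowB_dq_get?, rowB_dq2_get?, rowB_dash_get?, rowB_blk_get?, rowB_dd_get?,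
             Option.some.injEq, lit_cond, String.reduceToList, String.toList_ofList, List.cons.injEq, and_true, and_false, reduceCtorEq, if_false, eq_self_iff_true, if_true, Option.getD_some, Option.getD_none] <;>
           first | rfl | (split_ifs <;> rfl))

lemma main_dash (t : String) (c : Char) (l : List Char) (ht : t.toList = c :: l) :
    get_processing_state "--" t = get_processing_state_alt "--" t := by
  rw [get_processing_state, get_processing_state_alt, tblA_dash]
  rw [pyget0 t c l ht]
  simp only [pyget1 t c l ht, contB_dash, explB_dash, Bool.true_eq_false,
    rowA_dash_get?, rowB_dash_get?, Option.some.injEq, lit_cond, String.reduceToList, String.toList_ofList, List.cons.injEq, and_true, and_false, reduceCtorEq, if_false, eq_self_iff_true, if_true, Option.getD_some, Option.getD_none]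
  split_ifs <;> simp only [] <;>
    first
      | rfl
      | (simp only [Option.getD_some, defD_dash]; rfl)
      | (split <;> rename_i heq <;> rw [pyget1 t c l ht] at heq <;>
           simp only [heq, scA_us, scA_q, scA_q2, scA_dq, scA_dq2, scA_semi,
             explB_us, explB_q, explB_q2, explB_dq, explB_dq2, explB_dash, explB_blk, explB_dd, explB_semi,
             defB_us, defB_q, defB_q2, defB_dq, defB_dq2, defB_dash, defB_blk, defB_dd, defB_semi,
             PySem.Dict.getD_eq_get?_getD, rowB_us_get?, rowB_q_get?, rowB_q2_get?, rowB_dq_get?, rowB_dq2_get?, rowB_dash_get?, rowB_blk_get?, rowB_dd_get?,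
             Option.some.injEq, lit_cond, String.reduceToList, String.toList_ofList, List.cons.injEq, and_true, and_false, reduceCtorEq, if_false, eq_self_iff_true, if_true, Option.getD_some, Option.getD_none] <;>
           first | rfl | (split_ifs <;> rfl))

lemma main_blk (t : String) (c : Char) (l : List Char) (ht : t.toList = c :: l) :
    get_processing_state "/*" t = get_processing_state_alt "/*" t := by
  rw [get_processing_state, get_processing_state_alt, tblA_blk]
  rw [pyget0 t c l ht]
  simp only [pyget1 t c l ht, contB_blk, explB_blk, Bool.true_eq_false,
    rowA_blk_get?, rowB_blk_get?, Option.some.injEq, lit_cond, String.reduceToList, String.toList_ofList, List.cons.injEq, and_true, and_false, reduceCtorEq, if_false, eq_self_iff_true, if_true, Option.getD_some, Option.getD_none]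
  split_ifs <;> simp only [] <;>
    first
      | rfl
      | (simp only [Option.getD_some, defD_blk]; rfl)
      | (split <;> rename_i heq <;> rw [pyget1 t c l ht] at heq <;>
           simp only [heq, scA_us, scA_q, scA_q2, scA_dq, scA_dq2, scA_semi,
             explB_us, explB_q, explB_q2, explB_dq, explB_dq2, explB_dash, explB_blk, explB_dd, explB_semi,
             defB_us, defB_q, defB_q2, defB_dq, defB_dq2, defB_dash, defB_blk, defB_dd, defB_semi,
             PySem.Dict.getD_eq_get?_getD, rowB_us_get?, rowB_q_get?, rowB_q2_get?, rowB_dq_get?, rowB_dq2_get?, rowB_dash_get?, rowB_blk_get?, rowB_dd_get?,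
             Option.some.injEq, lit_cond, String.reduceToList, String.toList_ofList, List.cons.injEq, and_true, and_false, reduceCtorEq, if_false, eq_self_iff_true, if_true, Option.getD_some, Option.getD_none] <;>
           first | rfl | (split_ifs <;> rfl))

lemma main_dd (t : String) (c : Char) (l : List Char) (ht : t.toList = c :: l) :
    get_processing_state "$$" t = get_processing_state_alt "$$" t := by
  rw [get_processing_state, get_processing_state_alt, tblA_dd]
  rw [pyget0 t c l ht]
  simp only [pyget1 t c l ht, contB_dd, explB_dd, Bool.true_eq_false,
    rowA_dd_get?, rowB_dd_get?, Option.some.injEq, lit_cond, String.reduceToList, String.toList_ofList, List.cons.injEq, and_true, and_false, reduceCtorEq, if_false, eq_self_iff_true, if_true, Option.getD_some, Option.getD_none]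
  split_ifs <;> simp only [] <;>
    first
      | rfl
      | (simp only [Option.getD_some, defD_dd]; rfl)
      | (split <;> rename_i heq <;> rw [pyget1 t c l ht] at heq <;>
           simp only [heq, scA_us, scA_q, scA_q2, scA_dq, scA_dq2, scA_semi,
             explB_us, explB_q, explB_q2, explB_dq, explB_dq2, explB_dash, explB_blk, explB_dd, explB_semi,
             defB_us, defB_q, defB_q2, defB_dq, defB_dq2, defB_dash, defB_blk, defB_dd, defB_semi,
             PySem.Dict.getD_eq_get?_getD, rowB_us_get?, rowB_q_get?, rowB_q2_get?, rowB_dq_get?, rowB_dq2_get?, rowB_dash_get?, rowB_blk_get?, rowB_dd_get?,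
             Option.some.injEq, lit_cond, String.reduceToList, String.toList_ofList, List.cons.injEq, and_true, and_false, reduceCtorEq, if_false, eq_self_iff_true, if_true, Option.getD_some, Option.getD_none] <;>
           first | rfl | (split_ifs <;> rfl))

-- ===== VERDICT (by name: the statement is the Claim_ definition above) =====
theorem get_processing_state_spec : Claim_equal_get_processing_state := by
  intro s t hdom hpre
  obtain ⟨hs, hne, -⟩ := hpre
  obtain ⟨c, l, ht⟩ : ∃ c l, t.toList = c :: l := by
    cases h : t.toList with
    | nil => exact absurd h hne
    | cons a b => exact ⟨a, b, rfl⟩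
  unfold Spec_get_processing_state
  simp only [List.mem_cons, List.not_mem_nil, or_false] at hs
  rcases hs with h|h|h|h|h|h|h|h <;> subst h
  · exact main_us t c l ht
  · exact main_q t c l ht
  · exact main_q2 t c l ht
  · exact main_dq t c l ht
  · exact main_dq2 t c l ht
  · exact main_dash t c l ht
  · exact main_blk t c l ht
  · exact main_dd t c l ht
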